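-- pv_equiv track=rewrite | github.com/ninjra/statistics_harness | plugins/analysis_sequence_classification/plugin.py | _candidate_columns
-- ===== SOURCE A (Python) =====
-- def _candidate_columns(
--     preferred: str | None,
--     columns: list[str],
--     role_by_name: dict[str, str],
--     roles: set[str],
--     patterns: list[str],
--     lower_names: dict[str, str],
-- ) -> list[str]:
--     seen: set[str] = set()
--     candidates: list[str] = []
--     if preferred and preferred in columns and preferred not in seen:
--         candidates.append(preferred)
--         seen.add(preferred)
--     for col in columns:
--         if role_by_name.get(col) in roles and col not in seen:
--             candidates.append(col)
--             seen.add(col)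
--     for col in columns:
--         if col in seen:
--             continue
--         name = lower_names[col]
--         if any(pattern in name for pattern in patterns):
--             candidates.append(col)
--             seen.add(col)
--     return candidates
-- ===== SOURCE B (Python) =====
-- def _candidate_columns(
--     preferred: str | None,
--     columns: list[str],
--     role_by_name: dict[str, str],
--     roles: set[str],
--     patterns: list[str],
--     lower_names: dict[str, str],
-- ) -> list[str]:
--     # Single classifying pass: bucket each column as role-hit or pattern-hit,
--     # then concatenate preferred + role bucket + pattern bucket.
--     pref_kept = preferred if preferred and preferred in columns else None
--     seen = set() if pref_kept is None else {pref_kept}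
--     role_list: list[str] = []
--     pattern_list: list[str] = []
--     for col in columns:
--         if col in seen:
--             continue
--         if role_by_name.get(col) in roles:
--             role_list.append(col)
--             seen.add(col)
--         elif any(pattern in lower_names[col] for pattern in patterns):
--             pattern_list.append(col)
--             seen.add(col)
--     head = [] if pref_kept is None else [pref_kept]
--     return head + role_list + pattern_list
-- ===== Notes on version B (the rewrite author's own statement) =====
-- stated objective: simpler
-- what changed: Replaces A's two sequential scans over columns (role scan, then pattern scan) with a single classifying scan that buckets each unseen column into a role list or a pattern list and concatenates preferred + role bucket + pattern bucket at the end.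
import Mathlib
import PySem

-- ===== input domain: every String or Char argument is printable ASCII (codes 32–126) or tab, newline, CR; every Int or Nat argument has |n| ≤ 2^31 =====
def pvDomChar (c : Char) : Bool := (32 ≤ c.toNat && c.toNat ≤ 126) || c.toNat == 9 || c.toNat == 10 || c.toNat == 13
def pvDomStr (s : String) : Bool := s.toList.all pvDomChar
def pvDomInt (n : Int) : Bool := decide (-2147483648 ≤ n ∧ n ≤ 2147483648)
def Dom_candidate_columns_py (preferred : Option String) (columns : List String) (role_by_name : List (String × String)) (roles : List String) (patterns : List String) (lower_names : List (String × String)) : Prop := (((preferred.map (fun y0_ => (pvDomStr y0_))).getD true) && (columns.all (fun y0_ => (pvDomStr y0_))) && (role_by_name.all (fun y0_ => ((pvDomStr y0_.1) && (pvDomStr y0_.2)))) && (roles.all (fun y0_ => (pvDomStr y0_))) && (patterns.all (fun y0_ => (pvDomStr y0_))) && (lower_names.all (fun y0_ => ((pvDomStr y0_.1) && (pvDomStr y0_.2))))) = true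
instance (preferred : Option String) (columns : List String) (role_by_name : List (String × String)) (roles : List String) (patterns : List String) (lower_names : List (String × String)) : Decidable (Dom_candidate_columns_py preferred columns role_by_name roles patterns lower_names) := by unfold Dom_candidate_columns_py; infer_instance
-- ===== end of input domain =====

-- B replaces A's two sequential scans over `columns` by one classifying scan into two
-- buckets concatenated at the end (objective: simpler decomposition, same O(n·m) cost).

-- shared helpers: both Pythons evaluate literally these expressions
-- `role_by_name.get(col) in roles` (None ∈ roles is False for a set of str):
def pvRoleHit (role_by_name : List (String × String)) (roles : List String) (c : String) : Bool :=
  match PySem.Dict.get? ⟨role_by_name⟩ c with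
  | some r => roles.contains r
  | none => false

-- `pattern in lower_names[col]`; the KeyError case (key absent) is excluded by
-- Pre_candidate_columns_py, so the total `getD _ ""` is exact on the admitted inputs:
def pvPatHit (patterns : List String) (lower_names : List (String × String)) (c : String) : Bool :=
  patterns.any (fun p => PySem.Str.isIn p (PySem.Dict.getD ⟨lower_names⟩ c ""))

-- ===== PORT A =====
-- A's first loop: append role-hit unseen columns, threading `seen`
def pvRoleLoopA (rh : String → Bool) : List String → List String → List String × List String
  | [], seen => ([], seen)
  | c :: cs, seen =>
    if rh c && !(seen.contains c) then
      let r := pvRoleLoopA rh cs (c :: seen)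
      (c :: r.1, r.2)
    else pvRoleLoopA rh cs seen

-- A's second loop: append pattern-hit unseen columns
def pvPatLoopA (ph : String → Bool) : List String → List String → List String
  | [], _ => []
  | c :: cs, seen =>
    if seen.contains c then pvPatLoopA ph cs seen
    else if ph c then c :: pvPatLoopA ph cs (c :: seen)
    else pvPatLoopA ph cs seen

def candidate_columns_py (preferred : Option String) (columns : List String) (role_by_name : List (String × String)) (roles : List String) (patterns : List String) (lower_names : List (String × String)) : List String :=
  -- `if preferred and preferred in columns` (preferred not in seen is vacuous: seen = ∅)
  let init : List String × List String :=
    match preferred with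
    | some p => if p ≠ "" && columns.contains p then ([p], [p]) else ([], [])
    | none => ([], [])
  let afterRole := pvRoleLoopA (pvRoleHit role_by_name roles) columns init.2
  init.1 ++ afterRole.1 ++ pvPatLoopA (pvPatHit patterns lower_names) columns afterRole.2

-- ===== PORT B =====
-- B's single classifying pass: (role bucket, pattern bucket) with one shared `seen`
def pvClassifyB (rh ph : String → Bool) : List String → List String → List String × List String
  | [], _ => ([], [])
  | c :: cs, seen =>
    if seen.contains c then pvClassifyB rh ph cs seen
    else if rh c then
      let r := pvClassifyB rh ph cs (c :: seen)
      (c :: r.1, r.2)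
    else if ph c then
      let r := pvClassifyB rh ph cs (c :: seen)
      (r.1, c :: r.2)
    else pvClassifyB rh ph cs seen

def candidate_columns_py_alt (preferred : Option String) (columns : List String) (role_by_name : List (String × String)) (roles : List String) (patterns : List String) (lower_names : List (String × String)) : List String :=
  let prefKept : Option String :=
    match preferred with
    | some p => if p ≠ "" && columns.contains p then some p else none
    | none => none
  let seen : List String := match prefKept with | some p => [p] | none => []
  let buckets := pvClassifyB (pvRoleHit role_by_name roles) (pvPatHit patterns lower_names) columns seen
  (match prefKept with | some p => [p] | none => []) ++ buckets.1 ++ buckets.2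

-- ===== PRECONDITION & SPEC =====
-- Pre_ excludes exactly the inputs where Python A raises KeyError: a column that is neither
-- role-hit nor the kept preferred and is missing from lower_names (A reads lower_names[col]).
def Pre_candidate_columns_py (preferred : Option String) (columns : List String) (role_by_name : List (String × String)) (roles : List String) (patterns : List String) (lower_names : List (String × String)) : Prop :=
  ∀ c ∈ columns,
    ((PySem.Dict.get? (⟨role_by_name⟩ : PySem.Dict String String) c).map roles.contains).getD false = true
    ∨ (preferred = some c ∧ c ≠ "")
    ∨ PySem.Dict.contains (⟨lower_names⟩ : PySem.Dict String String) c = true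
instance (preferred : Option String) (columns : List String) (role_by_name : List (String × String)) (roles : List String) (patterns : List String) (lower_names : List (String × String)) : Decidable (Pre_candidate_columns_py preferred columns role_by_name roles patterns lower_names) := by unfold Pre_candidate_columns_py; infer_instance

def pvWitness_candidate_columns_py : Option String × List String × (List (String × String)) × List String × List String × (List (String × String)) :=
  (some "a", ["a", "b", "c"], [("b", "r")], ["r"], ["c"], [("c", "xtscore")])

def Spec_candidate_columns_py (preferred : Option String) (columns : List String) (role_by_name : List (String × String)) (roles : List String) (patterns : List String) (lower_names : List (String × String)) (out : List String) : Prop := out = candidate_columns_py_alt preferred columns role_by_name roles patterns lower_names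
instance (preferred : Option String) (columns : List String) (role_by_name : List (String × String)) (roles : List String) (patterns : List String) (lower_names : List (String × String)) (out : List String) : Decidable (Spec_candidate_columns_py preferred columns role_by_name roles patterns lower_names out) := by unfold Spec_candidate_columns_py; infer_instance

-- ===== CLAIM (what is proved, stated in full; the proofs are below) =====
def Claim_equal_candidate_columns_py : Prop := ∀ (preferred : Option String) (columns : List String) (role_by_name : List (String × String)) (roles : List String) (patterns : List String) (lower_names : List (String × String)), Dom_candidate_columns_py preferred columns role_by_name roles patterns lower_names → Pre_candidate_columns_py preferred columns role_by_name roles patterns lower_names → Spec_candidate_columns_py preferred columns role_by_name roles patterns lower_names (candidate_columns_py preferred columns role_by_name roles patterns lower_names)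

-- ===== LEMMAS AND PROOFS =====

-- membership in `seen` after A's role loop
theorem pvRoleLoopA_seen_mem (rh : String → Bool) (cols : List String) (seen : List String) (c : String) :
    c ∈ (pvRoleLoopA rh cols seen).2 ↔ c ∈ seen ∨ (c ∈ cols ∧ rh c = true) := by
  induction cols generalizing seen with
  | nil => simp [pvRoleLoopA]
  | cons h t ih =>
    by_cases hc : (rh h && !(seen.contains h)) = true
    · have e : pvRoleLoopA rh (h :: t) seen
          = (h :: (pvRoleLoopA rh t (h :: seen)).1, (pvRoleLoopA rh t (h :: seen)).2) := by
        simp only [pvRoleLoopA]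
        rw [if_pos hc]
      have hc' : rh h = true := by
        simpa using (Bool.and_eq_true _ _ |>.mp hc).1
      rw [e]
      simp only [ih, List.mem_cons]
      constructor
      · rintro ((rfl | hs) | ⟨ht, hr⟩)
        · exact Or.inr ⟨Or.inl rfl, hc'⟩
        · exact Or.inl hs
        · exact Or.inr ⟨Or.inr ht, hr⟩
      · rintro (hs | ⟨(rfl | ht), hr⟩)
        · exact Or.inl (Or.inr hs)
        · exact Or.inl (Or.inl rfl)
        · exact Or.inr ⟨ht, hr⟩
    · have e : pvRoleLoopA rh (h :: t) seen = pvRoleLoopA rh t seen := by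
        simp only [pvRoleLoopA, hc]
        simp
      have hc' : rh h = true → h ∈ seen := by
        intro hr
        by_contra hnot
        exact hc (by simp [hr, List.contains_eq_mem, hnot])
      rw [e]
      simp only [ih, List.mem_cons]
      constructor
      · rintro (hs | ⟨ht, hr⟩)
        · exact Or.inl hs
        · exact Or.inr ⟨Or.inr ht, hr⟩
      · rintro (hs | ⟨(rfl | ht), hr⟩)
        · exact Or.inl hs
        · exact Or.inl (hc' hr)
        · exact Or.inr ⟨ht, hr⟩

-- B's role bucket = A's role-loop output, for seen-lists agreeing on role-hit columns
theorem pvClassifyB_fst (rh ph : String → Bool) (cols : List String) :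
    ∀ s s' : List String, (∀ c ∈ cols, rh c = true → (c ∈ s ↔ c ∈ s')) →
    (pvClassifyB rh ph cols s).1 = (pvRoleLoopA rh cols s').1 := by
  induction cols with
  | nil => intro s s' _; simp [pvClassifyB, pvRoleLoopA]
  | cons h t ih =>
    intro s s' hag
    by_cases hr : rh h = true
    · by_cases hs : h ∈ s
      · have hs' : h ∈ s' := (hag h (List.mem_cons_self) hr).mp hs
        simp only [pvClassifyB, pvRoleLoopA, List.contains_eq_mem, hs, decide_true, if_pos,
          hs', Bool.not_true, Bool.and_false, Bool.false_eq_true, if_neg, hr]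
        exact ih s s' (fun c hc => hag c (List.mem_cons_of_mem _ hc))
      · have hs' : h ∉ s' := fun hx => hs ((hag h (List.mem_cons_self) hr).mpr hx)
        simp only [pvClassifyB, pvRoleLoopA, List.contains_eq_mem, hs, decide_false,
          Bool.false_eq_true, if_neg, hr, if_pos, hs', Bool.not_false, Bool.and_self, if_true]
        have := ih (h :: s) (h :: s') (by
          intro c hc hrc
          simp only [List.mem_cons]
          exact or_congr Iff.rfl (hag c (List.mem_cons_of_mem _ hc) hrc))
        simp [this]
    · have hstep : (pvRoleLoopA rh (h :: t) s').1 = (pvRoleLoopA rh t s').1 := by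
        simp [pvRoleLoopA, hr]
      rw [hstep]
      by_cases hs : h ∈ s
      · simp only [pvClassifyB, List.contains_eq_mem, hs, decide_true, if_pos]
        exact ih s s' (fun c hc => hag c (List.mem_cons_of_mem _ hc))
      · by_cases hp : ph h = true
        · simp only [pvClassifyB, List.contains_eq_mem, hs, decide_false, Bool.false_eq_true,
            if_neg, hr, hp, if_pos]
          exact ih (h :: s) s' (by
            intro c hc hrc
            have := hag c (List.mem_cons_of_mem _ hc) hrc
            simp only [List.mem_cons]
            constructor
            · rintro (rfl | hcs)
              · exact absurd hrc (by simp [hr])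
              · exact this.mp hcs
            · intro hx; exact Or.inr (this.mpr hx))
        · simp only [pvClassifyB, List.contains_eq_mem, hs, decide_false, Bool.false_eq_true,
            if_neg, hr, hp]
          exact ih s s' (fun c hc => hag c (List.mem_cons_of_mem _ hc))

-- B's pattern bucket = A's pattern-loop output, when t ~ s ∪ role-hits
theorem pvClassifyB_snd (rh ph : String → Bool) (cols : List String) :
    ∀ s t : List String, (∀ c ∈ cols, (c ∈ t ↔ c ∈ s ∨ rh c = true)) →
    (pvClassifyB rh ph cols s).2 = pvPatLoopA ph cols t := by
  induction cols with
  | nil => intro s t _; simp [pvClassifyB, pvPatLoopA]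
  | cons h t' ih =>
    intro s t hag
    have hh := hag h List.mem_cons_self
    by_cases hst : h ∈ t
    · -- A skips; B either skips (h ∈ s) or takes the role branch (rh h)
      have hA : pvPatLoopA ph (h :: t') t = pvPatLoopA ph t' t := by
        simp [pvPatLoopA, List.contains_eq_mem, hst]
      rw [hA]
      rcases hh.mp hst with hs | hr
      · simp only [pvClassifyB, List.contains_eq_mem, hs, decide_true, if_pos]
        exact ih s t (fun c hc => hag c (List.mem_cons_of_mem _ hc))
      · by_cases hs : h ∈ s
        · simp only [pvClassifyB, List.contains_eq_mem, hs, decide_true, if_pos]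
          exact ih s t (fun c hc => hag c (List.mem_cons_of_mem _ hc))
        · simp only [pvClassifyB, List.contains_eq_mem, hs, decide_false, Bool.false_eq_true,
            if_neg, hr, if_pos]
          exact ih (h :: s) t (by
            intro c hc
            have := hag c (List.mem_cons_of_mem _ hc)
            simp only [List.mem_cons]
            constructor
            · intro hx; rcases this.mp hx with h1 | h1
              · exact Or.inl (Or.inr h1)
              · exact Or.inr h1
            · rintro ((rfl | h1) | h1)
              · exact hst
              · exact this.mpr (Or.inl h1)
              · exact this.mpr (Or.inr h1))
    · -- h ∉ t : hence h ∉ s and rh h = false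
      have hs : h ∉ s := fun hx => hst (hh.mpr (Or.inl hx))
      have hr : rh h = false := by
        cases hx : rh h with
        | false => rfl
        | true => exact absurd (hh.mpr (Or.inr hx)) hst
      by_cases hp : ph h = true
      · simp only [pvClassifyB, pvPatLoopA, List.contains_eq_mem, hs, hst, decide_false,
          Bool.false_eq_true, if_neg, hr, hp, if_pos]
        have := ih (h :: s) (h :: t) (by
          intro c hc
          have := hag c (List.mem_cons_of_mem _ hc)
          simp only [List.mem_cons]
          constructor
          · rintro (rfl | hx)
            · exact Or.inl (Or.inl rfl)
            · rcases this.mp hx with h1 | h1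
              · exact Or.inl (Or.inr h1)
              · exact Or.inr h1
          · rintro ((rfl | h1) | h1)
            · exact Or.inl rfl
            · exact Or.inr (this.mpr (Or.inl h1))
            · exact Or.inr (this.mpr (Or.inr h1)))
        simp [this]
      · simp only [pvClassifyB, pvPatLoopA, List.contains_eq_mem, hs, hst, decide_false,
          Bool.false_eq_true, if_neg, hr, hp]
        exact ih s t (fun c hc => hag c (List.mem_cons_of_mem _ hc))

-- ===== VERDICT (by name: the statement is the Claim_ definition above) =====
theorem candidate_columns_py_spec : Claim_equal_candidate_columns_py := by
  intro preferred columns role_by_name roles patterns lower_names _ _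
  unfold Spec_candidate_columns_py candidate_columns_py candidate_columns_py_alt
  set rh := pvRoleHit role_by_name roles with hrh
  set ph := pvPatHit patterns lower_names with hph
  have key : ∀ seen : List String,
      (pvRoleLoopA rh columns seen).1 ++ pvPatLoopA ph columns (pvRoleLoopA rh columns seen).2
        = (pvClassifyB rh ph columns seen).1 ++ (pvClassifyB rh ph columns seen).2 := by
    intro seen
    rw [pvClassifyB_fst rh ph columns seen seen (fun _ _ _ => Iff.rfl),
        pvClassifyB_snd rh ph columns seen (pvRoleLoopA rh columns seen).2 (by
          intro c hc
          rw [pvRoleLoopA_seen_mem]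
          constructor
          · rintro (h1 | ⟨_, h1⟩)
            · exact Or.inl h1
            · exact Or.inr h1
          · rintro (h1 | h1)
            · exact Or.inl h1
            · exact Or.inr ⟨hc, h1⟩)]
  match preferred with
  | none => simpa using key []
  | some p =>
    by_cases hp : p = ""
    · simpa [hp] using key []
    · by_cases hm : p ∈ columns
      · simpa [hp, hm, List.contains_eq_mem] using key [p]
      · simpa [hp, hm, List.contains_eq_mem] using key []
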